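-- pv_equiv track=rewrite | github.com/mikerin00/NerdsAdWar | src/entities/terrain_helpers.py | filterSmallPatches
-- ===== SOURCE A (Python) =====
-- from collections import deque
--
-- def filterSmallPatches(cellSet, minSize):
--     """Remove connected components smaller than minSize from cellSet (in-place).
--     Returns the set of removed cells."""
--     remaining = set(cellSet)
--     removed   = set()
--     while remaining:
--         seed  = next(iter(remaining))
--         queue = deque([seed])
--         patch = {seed}
--         while queue:
--             c = queue.popleft()
--             for dx, dy in ((1, 0), (-1, 0), (0, 1), (0, -1)):
--                 nb = (c[0] + dx, c[1] + dy)
--                 if nb in remaining and nb not in patch: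
--                     patch.add(nb)
--                     queue.append(nb)
--         remaining -= patch
--         if len(patch) < minSize:
--             cellSet -= patch
--             removed |= patch
--     return removed
-- ===== SOURCE B (Python) =====
-- def filterSmallPatches(cellSet, minSize):
--     """Remove connected components smaller than minSize from cellSet (in-place).
--     Returns the set of removed cells.
--
--     Staged re-implementation: first PARTITION the snapshot into connected
--     components (each grown a whole frontier at a time with bulk set algebra,
--     no per-cell queue), then filter out the small ones and remove them."""
--     def grow(seed, cells):
--         patch = {seed}
--         frontier = {seed}
--         while frontier:
--             cand = {n for (x, y) in frontier
--                       for n in ((x + 1, y), (x - 1, y), (x, y + 1), (x, y - 1))}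
--             frontier = cand & cells - patch
--             patch |= frontier
--         return patch
--
--     # stage 1: partition into connected components
--     comps = []
--     cells = set(cellSet)
--     while cells:
--         patch = grow(next(iter(cells)), cells)
--         cells -= patch
--         comps.append(patch)
--
--     # stage 2: collect the small components and remove them
--     removed = set()
--     for patch in comps:
--         if len(patch) < minSize:
--             removed |= patch
--     cellSet -= removed
--     return removed
-- ===== Notes on version B (the rewrite author's own statement) =====
-- stated objective: alternative
-- what changed: The interleaved per-cell deque BFS with immediate removal is replaced by a staged pipeline: a helper grows each component a whole frontier at a time with bulk set algebra (comprehension, &, -, |=, no queue), stage 1 partitions the snapshot into a list of components, stage 2 filters the small ones into removed and subtracts them once.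
import Mathlib
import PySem

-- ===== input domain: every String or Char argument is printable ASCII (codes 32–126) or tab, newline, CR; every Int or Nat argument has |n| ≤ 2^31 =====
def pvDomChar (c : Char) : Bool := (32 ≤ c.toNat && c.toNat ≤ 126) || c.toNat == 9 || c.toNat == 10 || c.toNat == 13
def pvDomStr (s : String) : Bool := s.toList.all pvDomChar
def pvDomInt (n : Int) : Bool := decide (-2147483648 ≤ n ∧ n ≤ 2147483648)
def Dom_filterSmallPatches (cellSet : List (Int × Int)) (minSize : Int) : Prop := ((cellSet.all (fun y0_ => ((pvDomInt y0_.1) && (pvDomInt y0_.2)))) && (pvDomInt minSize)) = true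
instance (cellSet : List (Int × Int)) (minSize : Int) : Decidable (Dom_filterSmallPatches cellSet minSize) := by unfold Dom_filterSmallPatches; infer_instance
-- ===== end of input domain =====

-- B replaces A's interleaved per-cell deque BFS by a staged pipeline: partition the snapshot into components
-- (each grown a whole frontier at a time by bulk set algebra), then filter the small ones (alternative, not faster).
-- Both Pythons remove the small patches from the argument set in place (A incrementally, B once at the end; the net
-- mutation is identical); the equivalence proved here is about the RETURN value (the set of removed cells) only.
-- Python returns a SET; per the type convention the ports return its elements as a list in the model's insertion
-- order (Python's hash iteration order is not modelled).  A's `next(iter(remaining))` is ported as the first element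
-- of the modelled set; the returned SET does not depend on which seed is picked.

-- ===== PORT A =====
-- ((1, 0), (-1, 0), (0, 1), (0, -1))
def pvDirsA : List (Int × Int) := [(1, 0), (-1, 0), (0, 1), (0, -1)]

-- inner `while queue:` loop; fuel: each iteration pops one cell, and at most 1 + |remaining| cells are ever queued,
-- so the fuel 1 + 5*|remaining| supplied by pvOuterA is never exhausted.  Python appends each discovered nb to the
-- queue immediately; since the queue is only popped between cells, collecting the cell's discoveries st.2 and
-- appending them after qs is the same queue.  `patch.add(nb)` runs under the `nb not in patch` guard, so it is
-- exactly st.1 ++ [nb].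
def pvBfs (rem : List (Int × Int)) : Nat → List (Int × Int) → List (Int × Int) → List (Int × Int)
  | 0, _, patch => patch
  | _ + 1, [], patch => patch
  | f + 1, c :: qs, patch =>
    let st := pvDirsA.foldl (fun (st : List (Int × Int) × List (Int × Int)) d =>
        let nb := (c.1 + d.1, c.2 + d.2)
        if nb ∈ rem ∧ nb ∉ st.1 then (st.1 ++ [nb], st.2 ++ [nb]) else st) (patch, [])
    pvBfs rem f (qs ++ st.2) st.1

-- outer `while remaining:` loop; each iteration removes at least the seed from remaining, so fuel |remaining| suffices.
def pvOuterA (minSize : Int) : Nat → List (Int × Int) → List (Int × Int) → List (Int × Int)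
  | 0, _, removed => removed
  | f + 1, remaining, removed =>
    match remaining with
    | [] => removed
    | seed :: _ =>                      -- seed = next(iter(remaining))
      let patch := pvBfs remaining (1 + 5 * remaining.length) [seed] [seed]
      let remaining' := PySem.Set.diff remaining patch
      let removed' := if PySem.Set.len patch < minSize then PySem.Set.union removed patch else removed
      pvOuterA minSize f remaining' removed'

def filterSmallPatches (cellSet : List (Int × Int)) (minSize : Int) : List (Int × Int) :=
  let remaining := PySem.Set.ofList cellSet
  pvOuterA minSize remaining.length remaining PySem.Set.empty

-- ===== PORT B =====
-- Source B's helper `grow(seed, cells)`: the `while frontier:` loop; fuel: every round with a nonempty next frontier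
-- strictly grows patch inside cells, so the |cells| + 1 rounds supplied by pvComponents always reach the empty frontier.
def pvGrow (cells : List (Int × Int)) : Nat → List (Int × Int) → List (Int × Int) → List (Int × Int)
  | 0, _, patch => patch
  | f + 1, frontier, patch =>
    if frontier = [] then patch
    else
      -- cand = {n for (x, y) in frontier for n in ((x+1, y), (x-1, y), (x, y+1), (x, y-1))}
      let cand := PySem.Set.ofList (frontier.flatMap (fun c =>
        [(c.1 + 1, c.2), (c.1 - 1, c.2), (c.1, c.2 + 1), (c.1, c.2 - 1)]))
      let frontier' := PySem.Set.diff (PySem.Set.inter cand cells) patch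
      pvGrow cells f frontier' (PySem.Set.union patch frontier')

-- stage 1: partition the snapshot into connected components (`while cells:` loop, building comps)
def pvComponents : Nat → List (Int × Int) → List (List (Int × Int))
  | 0, _ => []
  | f + 1, cells =>
    match cells with
    | [] => []
    | seed :: _ =>                      -- next(iter(cells))
      let patch := pvGrow cells (cells.length + 1) [seed] [seed]
      patch :: pvComponents f (PySem.Set.diff cells patch)

def filterSmallPatches_alt (cellSet : List (Int × Int)) (minSize : Int) : List (Int × Int) :=
  let cells := PySem.Set.ofList cellSet
  let comps := pvComponents cells.length cells
  -- stage 2: `for patch in comps: if len(patch) < minSize: removed |= patch`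
  (comps.filter (fun patch => PySem.Set.len patch < minSize)).foldl
    (fun removed patch => PySem.Set.union removed patch) PySem.Set.empty

-- ===== PRECONDITION & SPEC =====
def Spec_filterSmallPatches (cellSet : List (Int × Int)) (minSize : Int) (out : List (Int × Int)) : Prop := out = filterSmallPatches_alt cellSet minSize
instance (cellSet : List (Int × Int)) (minSize : Int) (out : List (Int × Int)) : Decidable (Spec_filterSmallPatches cellSet minSize out) := by unfold Spec_filterSmallPatches; infer_instance

-- ===== CLAIM (what is proved, stated in full; the proofs are below) =====
def Claim_equal_filterSmallPatches : Prop := ∀ (cellSet : List (Int × Int)) (minSize : Int), Dom_filterSmallPatches cellSet minSize → Spec_filterSmallPatches cellSet minSize (filterSmallPatches cellSet minSize)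

-- ===== LEMMAS AND PROOFS =====

-- one neighbour candidate step of A's inner loop, factored out for the proofs
def pvStep (rem : List (Int × Int)) (st : List (Int × Int) × List (Int × Int)) (nb : Int × Int) :
    List (Int × Int) × List (Int × Int) :=
  if nb ∈ rem ∧ nb ∉ st.1 then (st.1 ++ [nb], st.2 ++ [nb]) else st

def pvNbrs (c : Int × Int) : List (Int × Int) := pvDirsA.map (fun d => (c.1 + d.1, c.2 + d.2))

-- the fresh cells a stream l of candidates contributes against patch p (in discovery order)
def pvFresh (rem : List (Int × Int)) : List (Int × Int) → List (Int × Int) → List (Int × Int)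
  | [], _ => []
  | nb :: l, p => if nb ∈ rem ∧ nb ∉ p then nb :: pvFresh rem l (p ++ [nb]) else pvFresh rem l p

-- first occurrences of l not already in s (ofList/update relative to seen-set s)
def pvNews : List (Int × Int) → List (Int × Int) → List (Int × Int)
  | [], _ => []
  | x :: l, s => if x ∈ s then pvNews l s else x :: pvNews l (s ++ [x])

lemma pvFoldl_step_eq (rem : List (Int × Int)) :
    ∀ (l : List (Int × Int)) (p a : List (Int × Int)),
      l.foldl (pvStep rem) (p, a) = (p ++ pvFresh rem l p, a ++ pvFresh rem l p) := by
  intro l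
  induction l with
  | nil => intro p a; simp [pvFresh]
  | cons nb l ih =>
    intro p a
    by_cases h : nb ∈ rem ∧ nb ∉ p
    · simp only [List.foldl_cons, pvStep, pvFresh, h, ih]
      simp [List.append_assoc]
    · simp only [List.foldl_cons, pvStep, pvFresh, h, ih]
      simp

lemma pvMem_fresh (rem : List (Int × Int)) :
    ∀ (l p : List (Int × Int)) (x : Int × Int), x ∈ pvFresh rem l p → x ∈ rem ∧ x ∉ p := by
  intro l
  induction l with
  | nil => intro p x h; simp [pvFresh] at h
  | cons nb l ih =>
    intro p x h
    by_cases hc : nb ∈ rem ∧ nb ∉ p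
    · simp only [pvFresh, if_pos hc] at h
      rcases List.mem_cons.1 h with rfl | h
      · exact hc
      · have := ih _ _ h
        refine ⟨this.1, fun hx => this.2 (by simp [hx])⟩
    · simp only [pvFresh, if_neg hc] at h
      exact ih _ _ h

lemma pvNodup_fresh (rem : List (Int × Int)) :
    ∀ (l p : List (Int × Int)), (pvFresh rem l p).Nodup := by
  intro l
  induction l with
  | nil => intro p; simp [pvFresh]
  | cons nb l ih =>
    intro p
    by_cases hc : nb ∈ rem ∧ nb ∉ p
    · simp only [pvFresh, if_pos hc]
      refine List.nodup_cons.2 ⟨fun h => ?_, ih _⟩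
      have := pvMem_fresh rem l (p ++ [nb]) nb h
      simp at this
    · simpa [pvFresh, hc] using ih p

lemma pvFresh_append (rem : List (Int × Int)) (l₁ l₂ p : List (Int × Int)) :
    pvFresh rem (l₁ ++ l₂) p = pvFresh rem l₁ p ++ pvFresh rem l₂ (p ++ pvFresh rem l₁ p) := by
  have h := pvFoldl_step_eq rem (l₁ ++ l₂) p []
  rw [List.foldl_append, pvFoldl_step_eq, pvFoldl_step_eq] at h
  have := congrArg Prod.snd h
  simpa using this.symm

lemma pvBfs_nil (rem p : List (Int × Int)) (n : Nat) : pvBfs rem n [] p = p := by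
  cases n <;> rfl

lemma pvGrow_nil (rem p : List (Int × Int)) (n : Nat) : pvGrow rem n [] p = p := by
  cases n <;> simp [pvGrow]

lemma pvBfs_cons (rem : List (Int × Int)) (f : Nat) (c : Int × Int) (qs p : List (Int × Int)) :
    pvBfs rem (f + 1) (c :: qs) p =
      pvBfs rem f (qs ++ pvFresh rem (pvNbrs c) p) (p ++ pvFresh rem (pvNbrs c) p) := by
  have h : pvDirsA.foldl (fun (st : List (Int × Int) × List (Int × Int)) d =>
        let nb := (c.1 + d.1, c.2 + d.2)
        if nb ∈ rem ∧ nb ∉ st.1 then (st.1 ++ [nb], st.2 ++ [nb]) else st) (p, []) =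
      (pvNbrs c).foldl (pvStep rem) (p, []) := by
    rw [pvNbrs, List.foldl_map]
    rfl
  rw [pvBfs, h, pvFoldl_step_eq]
  simp

-- batching: processing the whole block q of the queue one cell at a time equals one bulk expansion
lemma pvBfs_batch (rem : List (Int × Int)) :
    ∀ (q : List (Int × Int)) (k : Nat) (tail p : List (Int × Int)),
      pvBfs rem (q.length + k) (q ++ tail) p =
        pvBfs rem k (tail ++ pvFresh rem (q.flatMap pvNbrs) p) (p ++ pvFresh rem (q.flatMap pvNbrs) p) := by
  intro q k
  induction q with
  | nil => intro tail p; simp [pvFresh]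
  | cons c q ih =>
    intro tail p
    have hlen : (c :: q).length + k = (q.length + k) + 1 := by
      simp only [List.length_cons]; omega
    rw [hlen, List.cons_append, pvBfs_cons]
    have hfa : (c :: q).flatMap pvNbrs = pvNbrs c ++ q.flatMap pvNbrs := by
      simp
    rw [hfa, pvFresh_append rem (pvNbrs c) (q.flatMap pvNbrs) p]
    have := ih (tail ++ pvFresh rem (pvNbrs c) p) (p ++ pvFresh rem (pvNbrs c) p)
    rw [show (q ++ tail) ++ pvFresh rem (pvNbrs c) p = q ++ (tail ++ pvFresh rem (pvNbrs c) p) from by simp,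
        this]
    simp [List.append_assoc]

lemma pvFoldl_add_append (l : List (Int × Int)) :
    ∀ (s : List (Int × Int)), (∀ x ∈ l, x ∉ s) → l.Nodup →
      l.foldl PySem.Set.add s = s ++ l := by
  induction l with
  | nil => intro s _ _; simp
  | cons x l ih =>
    intro s hdisj hnd
    have hx : x ∉ s := hdisj x (by simp)
    simp only [List.foldl_cons, PySem.Set.add]
    rw [if_neg (by simpa [List.contains_iff_mem] using hx)]
    rw [ih (s ++ [x]) ?_ (List.nodup_cons.1 hnd).2]
    · simp
    · intro y hy
      simp only [List.mem_append, List.mem_singleton]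
      rintro (h | rfl)
      · exact hdisj y (by simp [hy]) h
      · exact (List.nodup_cons.1 hnd).1 hy

lemma pvFoldl_add_news (l : List (Int × Int)) :
    ∀ (s : List (Int × Int)), l.foldl PySem.Set.add s = s ++ pvNews l s := by
  induction l with
  | nil => intro s; simp [pvNews]
  | cons x l ih =>
    intro s
    by_cases hx : x ∈ s
    · simp [PySem.Set.add, pvNews, hx, ih]
    · simp only [List.foldl_cons, PySem.Set.add, pvNews, hx]
      rw [if_neg (by simpa [List.contains_iff_mem] using hx)]
      simp [ih, List.append_assoc]

lemma pvMem_news (l : List (Int × Int)) :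
    ∀ (s : List (Int × Int)) (x : Int × Int), x ∈ pvNews l s → x ∉ s := by
  induction l with
  | nil => intro s x h; simp [pvNews] at h
  | cons y l ih =>
    intro s x h
    by_cases hy : y ∈ s
    · exact ih _ _ (by simpa [pvNews, hy] using h)
    · simp only [pvNews, if_neg hy] at h
      rcases List.mem_cons.1 h with rfl | h
      · exact hy
      · intro hs
        exact ih _ _ h (by simp [hs])

lemma pvFilter_news_eq_fresh (rem : List (Int × Int)) (l : List (Int × Int)) :
    ∀ (s p : List (Int × Int)), (∀ x, x ∈ s → x ∈ rem → x ∈ p) →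
      (pvNews l s).filter (fun x => rem.contains x && !p.contains x) = pvFresh rem l p := by
  induction l with
  | nil => intro s p _; simp [pvNews, pvFresh]
  | cons x l ih =>
    intro s p hsp
    by_cases hx : x ∈ s
    · have : ¬ (x ∈ rem ∧ x ∉ p) := fun h => h.2 (hsp x hx h.1)
      simp only [pvNews, if_pos hx, pvFresh, if_neg this]
      exact ih s p hsp
    · simp only [pvNews, if_neg hx]
      by_cases hq : x ∈ rem ∧ x ∉ p
      · have hcongr : (pvNews l (s ++ [x])).filter (fun y => rem.contains y && !p.contains y)
              = (pvNews l (s ++ [x])).filter (fun y => rem.contains y && !(p ++ [x]).contains y) := by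
          apply List.filter_congr
          intro y hy
          have hyx : y ≠ x := fun he => pvMem_news l (s ++ [x]) y hy (by simp [he])
          simp [hyx]
        have hsp' : ∀ y, y ∈ s ++ [x] → y ∈ rem → y ∈ p ++ [x] := by
          intro y hy hr
          rcases List.mem_append.1 hy with h | h
          · exact List.mem_append.2 (Or.inl (hsp y h hr))
          · exact List.mem_append.2 (Or.inr h)
        simp only [pvFresh, if_pos hq, List.filter_cons]
        rw [if_pos (by simp [hq.1, hq.2]), hcongr, ih _ _ hsp']
      · have hsp' : ∀ y, y ∈ s ++ [x] → y ∈ rem → y ∈ p := by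
          intro y hy hr
          rcases List.mem_append.1 hy with h | h
          · exact hsp y h hr
          · rcases List.mem_singleton.1 h with rfl
            exact by_contra fun hnp => hq ⟨hr, hnp⟩
        simp only [pvFresh, if_neg hq, List.filter_cons]
        rw [if_neg (by simp only [List.contains_iff_mem, Bool.and_eq_true,
              Bool.not_eq_true']; exact fun h => hq ⟨h.1, by simpa [List.contains_iff_mem] using h.2⟩), ih _ _ hsp']

-- one round of B's grow loop is exactly the bulk expansion of A's batched queue
lemma pvGrow_step (rem : List (Int × Int)) (f : Nat) (fr p : List (Int × Int)) (hfr : fr ≠ []) :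
    pvGrow rem (f + 1) fr p =
      pvGrow rem f (pvFresh rem (fr.flatMap pvNbrs) p) (p ++ pvFresh rem (fr.flatMap pvNbrs) p) := by
  have hgen : (fr.flatMap (fun c =>
        [(c.1 + 1, c.2), (c.1 - 1, c.2), (c.1, c.2 + 1), (c.1, c.2 - 1)])) = fr.flatMap pvNbrs := by
    have hfun : (fun c : Int × Int =>
        [(c.1 + 1, c.2), (c.1 - 1, c.2), (c.1, c.2 + 1), (c.1, c.2 - 1)]) = pvNbrs := by
      funext c; simp [pvNbrs, pvDirsA, sub_eq_add_neg]
    rw [hfun]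
  have hF : PySem.Set.diff (PySem.Set.inter
        (PySem.Set.ofList (fr.flatMap (fun c =>
          [(c.1 + 1, c.2), (c.1 - 1, c.2), (c.1, c.2 + 1), (c.1, c.2 - 1)]))) rem) p
      = pvFresh rem (fr.flatMap pvNbrs) p := by
    rw [hgen]
    show ((PySem.Set.ofList (fr.flatMap pvNbrs)).filter (fun x => rem.contains x)).filter
        (fun x => !p.contains x) = _
    rw [List.filter_filter]
    rw [List.filter_congr (l := PySem.Set.ofList (fr.flatMap pvNbrs))
        (q := fun x => rem.contains x && !p.contains x) (fun x _ => by rw [Bool.and_comm])]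
    have hof : PySem.Set.ofList (fr.flatMap pvNbrs) = pvNews (fr.flatMap pvNbrs) [] := by
      show (fr.flatMap pvNbrs).foldl PySem.Set.add [] = _
      rw [pvFoldl_add_news]; simp
    rw [hof, pvFilter_news_eq_fresh rem _ [] p (by simp)]
  have hU : PySem.Set.union p (pvFresh rem (fr.flatMap pvNbrs) p)
      = p ++ pvFresh rem (fr.flatMap pvNbrs) p := by
    show (pvFresh rem (fr.flatMap pvNbrs) p).foldl PySem.Set.add p = _
    exact pvFoldl_add_append _ p (fun x hx => (pvMem_fresh rem _ _ _ hx).2) (pvNodup_fresh rem _ _)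
  simp only [pvGrow, if_neg hfr]
  rw [hF, hU]

lemma pvFilter_length_split (rem : List (Int × Int)) (hnd : rem.Nodup) (p F : List (Int × Int))
    (hF : ∀ x ∈ F, x ∈ rem ∧ x ∉ p) (hFnd : F.Nodup) :
    (rem.filter (fun x => !p.contains x)).length =
      F.length + (rem.filter (fun x => !(p ++ F).contains x)).length := by
  have hperm : (rem.filter (fun x => !p.contains x)).Perm
      (F ++ rem.filter (fun x => !(p ++ F).contains x)) := by
    apply (List.perm_ext_iff_of_nodup (hnd.filter _) ?_).mpr
    · intro a
      simp only [List.mem_filter, List.mem_append, Bool.not_eq_true', List.contains_eq_mem,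
        decide_eq_false_iff_not, List.mem_append] at *
      constructor
      · rintro ⟨ha, hp⟩
        by_cases haF : a ∈ F
        · exact Or.inl haF
        · exact Or.inr ⟨ha, fun h => Or.elim h hp haF⟩
      · rintro (h | ⟨ha, hp⟩)
        · exact ⟨(hF a h).1, (hF a h).2⟩
        · exact ⟨ha, fun hpa => hp (Or.inl hpa)⟩
    · refine List.Nodup.append hFnd (hnd.filter _) ?_
      intro a haF hafil
      simp only [List.mem_filter, Bool.not_eq_true', List.contains_eq_mem,
        decide_eq_false_iff_not, List.mem_append] at hafil
      exact hafil.2 (Or.inr haF)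
  have := hperm.length_eq
  simpa using this

-- main inner-loop equivalence: BFS with enough fuel equals the frontier-growing loop with enough fuel
lemma pvBfs_eq_grow (rem : List (Int × Int)) (hnd : rem.Nodup) :
    ∀ (R : Nat) (fr p : List (Int × Int)) (nA nB : Nat),
      (rem.filter (fun x => !p.contains x)).length = R →
      fr.length + 5 * R ≤ nA → R + 1 ≤ nB →
      pvBfs rem nA fr p = pvGrow rem nB fr p := by
  intro R
  induction R using Nat.strong_induction_on with
  | _ R IH =>
    intro fr p nA nB hR hA hB
    cases fr with
    | nil => rw [pvBfs_nil, pvGrow_nil]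
    | cons c fr' =>
      have hbatch := pvBfs_batch rem (c :: fr') (nA - (c :: fr').length) [] p
      simp only [List.append_nil, List.nil_append] at hbatch
      have hkA : (c :: fr').length + (nA - (c :: fr').length) = nA := by
        have : (c :: fr').length ≤ nA := by omega
        omega
      rw [hkA] at hbatch
      have hnB : nB = (nB - 1) + 1 := by omega
      rw [hbatch, hnB, pvGrow_step rem (nB - 1) (c :: fr') p (by simp)]
      by_cases hFnil : pvFresh rem ((c :: fr').flatMap pvNbrs) p = []
      · rw [hFnil, pvBfs_nil, pvGrow_nil]
      · have hsplit := pvFilter_length_split rem hnd p (pvFresh rem ((c :: fr').flatMap pvNbrs) p)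
          (fun x hx => pvMem_fresh rem _ _ _ hx) (pvNodup_fresh rem _ _)
        have hFlen : 1 ≤ (pvFresh rem ((c :: fr').flatMap pvNbrs) p).length := by
          cases h : pvFresh rem ((c :: fr').flatMap pvNbrs) p with
          | nil => exact absurd h hFnil
          | cons a l => simp
        have hR' : (rem.filter (fun x =>
            !(p ++ pvFresh rem ((c :: fr').flatMap pvNbrs) p).contains x)).length < R := by omega
        exact IH _ hR' _ _ _ _ rfl (by simp only [List.length_cons] at hA ⊢; omega) (by omega)

-- the patch grown by B is nodup and stays inside cells
lemma pvGrow_sub (cells : List (Int × Int)) :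
    ∀ (f : Nat) (fr p : List (Int × Int)), (∀ x ∈ p, x ∈ cells) → p.Nodup →
      ∃ q, pvGrow cells f fr p = p ++ q ∧ (∀ x ∈ p ++ q, x ∈ cells) ∧ (p ++ q).Nodup := by
  intro f
  induction f with
  | zero =>
    intro fr p hp hnd
    exact ⟨[], by simp [pvGrow], by simpa using hp, by simpa using hnd⟩
  | succ f ih =>
    intro fr p hp hnd
    by_cases hfr : fr = []
    · subst hfr
      exact ⟨[], by simp [pvGrow], by simpa using hp, by simpa using hnd⟩
    · rw [pvGrow_step cells f fr p hfr]
      set F := pvFresh cells (fr.flatMap pvNbrs) p with hFdef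
      have hFsub : ∀ x ∈ F, x ∈ cells := fun x hx => (pvMem_fresh cells _ _ _ hx).1
      have hFnp : ∀ x ∈ F, x ∉ p := fun x hx => (pvMem_fresh cells _ _ _ hx).2
      have hpF : (p ++ F).Nodup := by
        refine List.Nodup.append hnd (pvNodup_fresh cells _ _) ?_
        intro a hap haF
        exact hFnp a haF hap
      have hpFsub : ∀ x ∈ p ++ F, x ∈ cells := by
        intro x hx
        rcases List.mem_append.1 hx with h | h
        · exact hp x h
        · exact hFsub x h
      obtain ⟨q, hq, hsub, hnd'⟩ := ih F (p ++ F) hpFsub hpF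
      exact ⟨F ++ q, by rw [hq]; simp, by simpa [List.append_assoc] using hsub,
        by simpa [List.append_assoc] using hnd'⟩

-- outer equivalence: A's interleaved loop equals B's partition-then-filter fold
lemma pvOuterA_eq_fold (minSize : Int) :
    ∀ (f : Nat) (rem removed : List (Int × Int)), rem.Nodup → removed.Nodup →
      (∀ x ∈ removed, x ∉ rem) →
      pvOuterA minSize f rem removed =
        ((pvComponents f rem).filter (fun patch => PySem.Set.len patch < minSize)).foldl
          (fun removed patch => PySem.Set.union removed patch) removed := by
  intro f
  induction f with
  | zero => intro rem removed _ _ _; rfl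
  | succ f ih =>
    intro rem removed hnd hrnd hdisj
    cases rem with
    | nil => rfl
    | cons seed rest =>
      -- the two grown patches coincide
      have hpatch : pvBfs (seed :: rest) (1 + 5 * (seed :: rest).length) [seed] [seed]
          = pvGrow (seed :: rest) ((seed :: rest).length + 1) [seed] [seed] := by
        apply pvBfs_eq_grow (seed :: rest) hnd
          (((seed :: rest).filter (fun x => !([seed] : List (Int × Int)).contains x)).length)
          [seed] [seed] _ _ rfl
        · exact Nat.add_le_add (by simp)
            (Nat.mul_le_mul_left 5 (List.length_filter_le _ _))
        · exact Nat.add_le_add_right (List.length_filter_le _ _) 1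
      set patch := pvGrow (seed :: rest) ((seed :: rest).length + 1) [seed] [seed] with hpdef
      obtain ⟨q, hq, hsub, hpnd⟩ := pvGrow_sub (seed :: rest) ((seed :: rest).length + 1)
        [seed] [seed] (by simp) (by simp)
      have hpsub : ∀ x ∈ patch, x ∈ seed :: rest := by rw [hpdef, hq]; exact hsub
      have hpnd' : patch.Nodup := by rw [hpdef, hq]; exact hpnd
      have hrem' : (PySem.Set.diff (seed :: rest) patch).Nodup := List.Nodup.filter _ hnd
      have hdisj' : ∀ x ∈ removed, x ∉ PySem.Set.diff (seed :: rest) patch := by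
        intro x hx hmem
        have : x ∈ seed :: rest := List.mem_of_mem_filter hmem
        exact hdisj x hx this
      simp only [pvOuterA, pvComponents, hpatch]
      rw [← hpdef]
      by_cases hsmall : PySem.Set.len patch < minSize
      · have hUnion : PySem.Set.union removed patch = removed ++ patch := by
          show patch.foldl PySem.Set.add removed = _
          exact pvFoldl_add_append patch removed
            (fun x hx => fun hr => hdisj x hr (hpsub x hx)) hpnd'
        have hrnd2 : (removed ++ patch).Nodup := by
          refine List.Nodup.append hrnd hpnd' ?_
          intro a ha hap
          exact hdisj a ha (hpsub a hap)
        have hdisj2 : ∀ x ∈ removed ++ patch, x ∉ PySem.Set.diff (seed :: rest) patch := by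
          intro x hx hmem
          rcases List.mem_append.1 hx with h | h
          · exact hdisj' x h hmem
          · have hnp : x ∉ patch := by simpa using (List.mem_filter.1 hmem).2
            exact hnp h
        rw [if_pos hsmall, List.filter_cons_of_pos (by simpa using hsmall), List.foldl_cons,
          hUnion, ih _ _ hrem' hrnd2 hdisj2]
      · rw [if_neg hsmall, List.filter_cons_of_neg (by simpa using hsmall),
          ih _ _ hrem' hrnd hdisj']

-- ===== VERDICT (by name: the statement is the Claim_ definition above) =====
theorem filterSmallPatches_spec : Claim_equal_filterSmallPatches := by
  intro cellSet minSize _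
  unfold Spec_filterSmallPatches filterSmallPatches filterSmallPatches_alt
  exact pvOuterA_eq_fold minSize _ _ _ (PySem.Set.nodup_ofList cellSet) (by simp [PySem.Set.empty])
    (by simp [PySem.Set.empty])
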